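-- pv_equiv track=rewrite | github.com/quantumquantara-arch/lumeren-language | lumeren_core/translator.py | translate_to_lumeren
-- ===== SOURCE A (Python) =====
-- def translate_to_lumeren(english):
--     # Placeholder: Map to glyphs based on lexicon (to be built)
--     # Example mappings from primitives
--     mapping = {
--         'existence': '⊙',
--         'observes': '→',
--         'change': 'Â',
--         'coherence': 'K',
--         # Add more from lexicon: e.g., 'sentient': ':.', 'harm': 'Y Â', etc.
--     }
--     # Simple replace for demo - real impl would parse semantics
--     for word, glyph in mapping.items():
--         english = english.replace(word, glyph)
--     return english  # Return glyph string
-- ===== SOURCE B (Python) =====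
-- import re
--
--
-- def translate_to_lumeren(english):
--     mapping = {
--         'existence': '⊙',
--         'observes': '→',
--         'change': 'Â',
--         'coherence': 'K',
--     }
--     pattern = re.compile('|'.join(re.escape(w) for w in mapping))
--     return pattern.sub(lambda m: mapping[m.group(0)], english)
-- ===== Notes on version B (the rewrite author's own statement) =====
-- stated objective: idiomatic
-- what changed: Replaces four sequential full-string str.replace passes by a single compiled regex alternation that rewrites all lexicon words in one left-to-right pass via one dict lookup per match.
-- outside the precondition, e.g. on translate_to_lumeren('changexistence'): A returns 'chang⊙', B returns 'Âxistence'; on translate_to_lumeren('coherencexistence'): A returns 'coherenc⊙', B returns 'Kxistence'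
import Mathlib
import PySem

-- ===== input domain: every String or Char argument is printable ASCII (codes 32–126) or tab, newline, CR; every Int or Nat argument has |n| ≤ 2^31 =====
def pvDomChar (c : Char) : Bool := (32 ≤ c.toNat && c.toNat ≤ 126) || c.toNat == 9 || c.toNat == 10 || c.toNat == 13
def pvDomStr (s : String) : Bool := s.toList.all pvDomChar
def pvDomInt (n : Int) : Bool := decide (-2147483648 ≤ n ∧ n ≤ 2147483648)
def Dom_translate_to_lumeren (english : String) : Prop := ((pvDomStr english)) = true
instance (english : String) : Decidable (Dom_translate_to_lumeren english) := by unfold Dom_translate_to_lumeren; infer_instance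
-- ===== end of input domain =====

set_option maxHeartbeats 1000000

-- B replaces A's four sequential full-string str.replace passes with one left-to-right
-- scan driven by an ordered word→glyph table (the compiled regex alternation in Source B);
-- objective: idiomatic single-pass substitution.

-- ===== PORT A =====
def translate_to_lumeren (english : String) : String :=
  (PySem.Dict.mk [("existence", "⊙"), ("observes", "→"), ("change", "Â"), ("coherence", "K")]).items.foldl
    (fun e p => PySem.Str.replace e p.1 p.2) english

-- ===== PORT B =====
-- the alternation 'existence|observes|change|coherence' with its replacement glyphs,
-- in the dict's insertion order (= the regex's alternation priority)
def pvGlyphTable : List (List Char × Char) :=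
  [("existence".toList, '⊙'), ("observes".toList, '→'), ("change".toList, 'Â'), ("coherence".toList, 'K')]

-- one left-to-right pass of pattern.sub: at each position, the first alternative that
-- matches is replaced and the scan resumes after it; otherwise the char is copied
def pvScan : List Char → List Char
  | [] => []
  | c :: t =>
    match pvGlyphTable.find? (fun p => p.1.isPrefixOf (c :: t)) with
    | some p => p.2 :: pvScan (t.drop (p.1.length - 1))
    | none => c :: pvScan t
termination_by l => l.length
decreasing_by all_goals (simp [List.length_drop]; try omega)

def translate_to_lumeren_alt (english : String) : String :=
  String.ofList (pvScan english.toList)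

-- ===== PRECONDITION & SPEC =====
-- Pre_ excludes strings containing an overlapping pair of lexicon words
-- ("changexistence" / "coherencexistence"): there A resolves the overlap by its dict
-- pass order (replacing the later-starting 'existence') while B's left-to-right scan
-- replaces the earlier-starting word — both resolutions of such an overlap are
-- accidental and neither is specified.
def Pre_translate_to_lumeren (english : String) : Prop :=
  PySem.Str.isIn "changexistence" english = false ∧
  PySem.Str.isIn "coherencexistence" english = false
instance (english : String) : Decidable (Pre_translate_to_lumeren english) := by
  unfold Pre_translate_to_lumeren; infer_instance

def pvWitness_translate_to_lumeren : String := "change observes existence"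

def Spec_translate_to_lumeren (english : String) (out : String) : Prop :=
  out = translate_to_lumeren_alt english
instance (english : String) (out : String) : Decidable (Spec_translate_to_lumeren english out) := by
  unfold Spec_translate_to_lumeren; infer_instance

-- ===== CLAIM (what is proved, stated in full; the proofs are below) =====
def Claim_equal_translate_to_lumeren : Prop := ∀ (english : String), Dom_translate_to_lumeren english → Pre_translate_to_lumeren english → Spec_translate_to_lumeren english (translate_to_lumeren english)

-- ===== LEMMAS AND PROOFS =====

-- the four keys as char lists
def pvKE : List Char := "existence".toList
def pvKO : List Char := "observes".toList
def pvKC : List Char := "change".toList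
def pvKH : List Char := "coherence".toList

-- clean structural form of Python's str.replace (old nonempty)
def pvRep (old new : List Char) : List Char → List Char
  | [] => []
  | c :: t =>
    if old.isPrefixOf (c :: t) then new ++ pvRep old new (t.drop (old.length - 1))
    else c :: pvRep old new t
termination_by l => l.length
decreasing_by all_goals (simp [List.length_drop]; try omega)

theorem pvGo_eq (old new : List Char) (hold : old ≠ []) :
    ∀ fuel l acc, l.length ≤ fuel →
      PySem.Chars.replace.go old new fuel l acc = acc.reverse ++ pvRep old new l := by
  intro fuel
  induction fuel with
  | zero =>
    intro l acc hl
    have : l = [] := by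
      cases l with
      | nil => rfl
      | cons c t => simp at hl
    subst this
    simp [PySem.Chars.replace.go, pvRep]
  | succ n ih =>
    intro l acc hl
    cases l with
    | nil => simp [PySem.Chars.replace.go, pvRep]
    | cons c t =>
      rw [PySem.Chars.replace.go]
      by_cases h : old.isPrefixOf (c :: t) = true
      · rw [if_pos h]
        have hdrop : List.drop old.length (c :: t) = t.drop (old.length - 1) := by
          cases old with
          | nil => exact absurd rfl hold
          | cons o os => simp
        rw [hdrop]
        have hlen : (t.drop (old.length - 1)).length ≤ n := by
          simp only [List.length_drop]
          simp at hl
          omega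
        rw [ih _ _ hlen]
        simp [pvRep, h]
      · rw [if_neg h]
        have hlen : t.length ≤ n := by simp at hl; omega
        rw [ih _ _ hlen]
        simp [pvRep, h]

theorem pvReplace_eq (old new l : List Char) (h : old ≠ []) :
    PySem.Chars.replace l old new = pvRep old new l := by
  unfold PySem.Chars.replace
  rw [if_neg (by simpa [List.isEmpty_iff] using h)]
  simpa using pvGo_eq old new h l.length l [] le_rfl

-- step lemmas for pvRep
theorem pvRep_match (old new l : List Char) (hold : old ≠ [])
    (h : old.isPrefixOf l = true) :
    pvRep old new l = new ++ pvRep old new (l.drop old.length) := by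
  cases l with
  | nil =>
    cases old with
    | nil => exact absurd rfl hold
    | cons o os => simp [List.isPrefixOf] at h
  | cons c t =>
    have hdrop : List.drop old.length (c :: t) = t.drop (old.length - 1) := by
      cases old with
      | nil => exact absurd rfl hold
      | cons o os => simp
    rw [hdrop]
    simp [pvRep, h]

theorem pvRep_match_cons (old new : List Char) (c : Char) (t : List Char)
    (h : old.isPrefixOf (c :: t) = true) :
    pvRep old new (c :: t) = new ++ pvRep old new (t.drop (old.length - 1)) := by
  simp [pvRep, h]

theorem pvRep_skip (old new : List Char) (c : Char) (t : List Char)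
    (h : old.isPrefixOf (c :: t) = false) :
    pvRep old new (c :: t) = c :: pvRep old new t := by
  simp [pvRep, h]

-- copying a stretch on which old never matches
theorem pvRep_pass (old new : List Char) :
    ∀ (k : Nat) (l : List Char), k ≤ l.length →
      (∀ j, j < k → old.isPrefixOf (l.drop j) = false) →
      pvRep old new l = l.take k ++ pvRep old new (l.drop k) := by
  intro k
  induction k with
  | zero => intro l _ _; simp
  | succ m ih =>
    intro l hl hj
    cases l with
    | nil => simp at hl
    | cons c t =>
      have h0 : old.isPrefixOf (c :: t) = false := by simpa using hj 0 (Nat.succ_pos m)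
      rw [pvRep_skip old new c t h0]
      have ht : pvRep old new t = t.take m ++ pvRep old new (t.drop m) := by
        refine ih t (by simp at hl; omega) ?_
        intro j hjm
        simpa [List.drop_succ_cons] using hj (j + 1) (by omega)
      simp [ht]

-- a glyph-free prefix of the output of pvRep reflects to the input
theorem pvRep_refl (old : List Char) (g : Char) :
    ∀ (l key : List Char), g ∉ key →
      key <+: pvRep old [g] l → key <+: l := by
  intro l
  induction l with
  | nil =>
    intro key hg h
    simp [pvRep] at h ⊢
    exact h
  | cons c t ih =>
    intro key hg h
    cases hm : old.isPrefixOf (c :: t) with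
    | true =>
      rw [pvRep_match_cons old [g] c t hm] at h
      simp only [List.singleton_append] at h
      cases key with
      | nil => exact List.nil_prefix
      | cons k0 ks =>
        rw [List.cons_prefix_cons] at h
        exact absurd (show g ∈ k0 :: ks by rw [← h.1]; exact List.mem_cons_self ..) hg
    | false =>
      rw [pvRep_skip old [g] c t hm] at h
      cases key with
      | nil => exact List.nil_prefix
      | cons k0 ks =>
        rw [List.cons_prefix_cons] at h
        exact List.cons_prefix_cons.mpr
          ⟨h.1, ih ks (fun hin => hg (List.mem_cons_of_mem _ hin)) h.2⟩

-- the composite of A's four replace passes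
def pvF (l : List Char) : List Char :=
  pvRep pvKH ['K'] (pvRep pvKC ['Â'] (pvRep pvKO ['→'] (pvRep pvKE ['⊙'] l)))

-- goodness: the two overlapping-pair substrings are absent
def pvGood (l : List Char) : Prop :=
  ¬ ("changexistence".toList <:+: l) ∧ ¬ ("coherencexistence".toList <:+: l)

theorem pvGood_drop (l : List Char) (k : Nat) (hg : pvGood l) : pvGood (l.drop k) :=
  ⟨fun h => hg.1 (h.trans (List.drop_suffix k l).isInfix),
   fun h => hg.2 (h.trans (List.drop_suffix k l).isInfix)⟩

-- ===== pvF step lemmas =====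

theorem pvF_E (t : List Char) : pvF (pvKE ++ t) = '⊙' :: pvF t := by
  unfold pvF
  have h1 : pvRep pvKE ['⊙'] (pvKE ++ t) = '⊙' :: pvRep pvKE ['⊙'] t := by
    rw [pvRep_match pvKE ['⊙'] _ (by decide)
      (by rw [List.isPrefixOf_iff_prefix]; exact List.prefix_append _ _)]
    rw [List.drop_left]
    simp
  rw [h1,
    pvRep_skip pvKO _ _ _ (by simp [pvKO, List.isPrefixOf]),
    pvRep_skip pvKC _ _ _ (by simp [pvKC, List.isPrefixOf]),
    pvRep_skip pvKH _ _ _ (by simp [pvKH, List.isPrefixOf])]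

theorem pvF_O (t : List Char) : pvF (pvKO ++ t) = '→' :: pvF t := by
  unfold pvF
  have h1 : pvRep pvKE ['⊙'] (pvKO ++ t) = pvKO ++ pvRep pvKE ['⊙'] t := by
    have := pvRep_pass pvKE ['⊙'] 8 (pvKO ++ t) (by simp [pvKO]) ?_
    · simpa [pvKO] using this
    · intro j hj
      interval_cases j <;> simp [pvKE, pvKO, List.isPrefixOf]
  have h2 : pvRep pvKO ['→'] (pvKO ++ pvRep pvKE ['⊙'] t)
      = '→' :: pvRep pvKO ['→'] (pvRep pvKE ['⊙'] t) := by
    rw [pvRep_match pvKO ['→'] _ (by decide)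
      (by rw [List.isPrefixOf_iff_prefix]; exact List.prefix_append _ _)]
    rw [List.drop_left]
    simp
  rw [h1, h2,
    pvRep_skip pvKC _ _ _ (by simp [pvKC, List.isPrefixOf]),
    pvRep_skip pvKH _ _ _ (by simp [pvKH, List.isPrefixOf])]

theorem pvF_C (t : List Char) (hx : ("xistence".toList).isPrefixOf t = false) :
    pvF (pvKC ++ t) = 'Â' :: pvF t := by
  unfold pvF
  have h1 : pvRep pvKE ['⊙'] (pvKC ++ t) = pvKC ++ pvRep pvKE ['⊙'] t := by
    have := pvRep_pass pvKE ['⊙'] 6 (pvKC ++ t) (by simp [pvKC]) ?_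
    · simpa [pvKC] using this
    · intro j hj
      interval_cases j <;> simp_all [pvKE, pvKC, List.isPrefixOf]
  have h2 : pvRep pvKO ['→'] (pvKC ++ pvRep pvKE ['⊙'] t)
      = pvKC ++ pvRep pvKO ['→'] (pvRep pvKE ['⊙'] t) := by
    have := pvRep_pass pvKO ['→'] 6 (pvKC ++ pvRep pvKE ['⊙'] t) (by simp [pvKC]) ?_
    · simpa [pvKC] using this
    · intro j hj
      interval_cases j <;> simp [pvKO, pvKC, List.isPrefixOf]
  have h3 : pvRep pvKC ['Â'] (pvKC ++ pvRep pvKO ['→'] (pvRep pvKE ['⊙'] t))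
      = 'Â' :: pvRep pvKC ['Â'] (pvRep pvKO ['→'] (pvRep pvKE ['⊙'] t)) := by
    rw [pvRep_match pvKC ['Â'] _ (by decide)
      (by rw [List.isPrefixOf_iff_prefix]; exact List.prefix_append _ _)]
    rw [List.drop_left]
    simp
  rw [h1, h2, h3, pvRep_skip pvKH _ _ _ (by simp [pvKH, List.isPrefixOf])]

theorem pvF_H (t : List Char) (hx : ("xistence".toList).isPrefixOf t = false) :
    pvF (pvKH ++ t) = 'K' :: pvF t := by
  unfold pvF
  have h1 : pvRep pvKE ['⊙'] (pvKH ++ t) = pvKH ++ pvRep pvKE ['⊙'] t := by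
    have := pvRep_pass pvKE ['⊙'] 9 (pvKH ++ t) (by simp [pvKH]) ?_
    · simpa [pvKH] using this
    · intro j hj
      interval_cases j <;> simp_all [pvKE, pvKH, List.isPrefixOf]
  have h2 : pvRep pvKO ['→'] (pvKH ++ pvRep pvKE ['⊙'] t)
      = pvKH ++ pvRep pvKO ['→'] (pvRep pvKE ['⊙'] t) := by
    have := pvRep_pass pvKO ['→'] 9 (pvKH ++ pvRep pvKE ['⊙'] t) (by simp [pvKH]) ?_
    · simpa [pvKH] using this
    · intro j hj
      interval_cases j <;> simp [pvKO, pvKH, List.isPrefixOf]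
  have h3 : pvRep pvKC ['Â'] (pvKH ++ pvRep pvKO ['→'] (pvRep pvKE ['⊙'] t))
      = pvKH ++ pvRep pvKC ['Â'] (pvRep pvKO ['→'] (pvRep pvKE ['⊙'] t)) := by
    have := pvRep_pass pvKC ['Â'] 9 (pvKH ++ pvRep pvKO ['→'] (pvRep pvKE ['⊙'] t)) (by simp [pvKH]) ?_
    · simpa [pvKH] using this
    · intro j hj
      interval_cases j <;> simp [pvKC, pvKH, List.isPrefixOf]
  have h4 : pvRep pvKH ['K'] (pvKH ++ pvRep pvKC ['Â'] (pvRep pvKO ['→'] (pvRep pvKE ['⊙'] t)))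
      = 'K' :: pvRep pvKH ['K'] (pvRep pvKC ['Â'] (pvRep pvKO ['→'] (pvRep pvKE ['⊙'] t))) := by
    rw [pvRep_match pvKH ['K'] _ (by decide)
      (by rw [List.isPrefixOf_iff_prefix]; exact List.prefix_append _ _)]
    rw [List.drop_left]
    simp
  rw [h1, h2, h3, h4]

theorem pvF_skip (c : Char) (t : List Char)
    (hE : pvKE.isPrefixOf (c :: t) = false) (hO : pvKO.isPrefixOf (c :: t) = false)
    (hC : pvKC.isPrefixOf (c :: t) = false) (hH : pvKH.isPrefixOf (c :: t) = false) :
    pvF (c :: t) = c :: pvF t := by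
  unfold pvF
  rw [pvRep_skip pvKE _ _ _ hE]
  have hO' : pvKO.isPrefixOf (c :: pvRep pvKE ['⊙'] t) = false := by
    cases hb : pvKO.isPrefixOf (c :: pvRep pvKE ['⊙'] t) with
    | false => rfl
    | true =>
      exfalso
      have hp := List.isPrefixOf_iff_prefix.mp hb
      rw [show pvKO = 'o' :: "bserves".toList from by decide, List.cons_prefix_cons] at hp
      have hr := pvRep_refl pvKE '⊙' t "bserves".toList (by decide) hp.2
      have : pvKO.isPrefixOf (c :: t) = true := by
        rw [List.isPrefixOf_iff_prefix,
          show pvKO = 'o' :: "bserves".toList from by decide, List.cons_prefix_cons]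
        exact ⟨hp.1, hr⟩
      exact absurd this (by simp [hO])
  rw [pvRep_skip pvKO _ _ _ hO']
  have hC' : pvKC.isPrefixOf (c :: pvRep pvKO ['→'] (pvRep pvKE ['⊙'] t)) = false := by
    cases hb : pvKC.isPrefixOf (c :: pvRep pvKO ['→'] (pvRep pvKE ['⊙'] t)) with
    | false => rfl
    | true =>
      exfalso
      have hp := List.isPrefixOf_iff_prefix.mp hb
      rw [show pvKC = 'c' :: "hange".toList from by decide, List.cons_prefix_cons] at hp
      have s1 := pvRep_refl pvKO '→' (pvRep pvKE ['⊙'] t) "hange".toList (by decide) hp.2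
      have s2 := pvRep_refl pvKE '⊙' t "hange".toList (by decide) s1
      have : pvKC.isPrefixOf (c :: t) = true := by
        rw [List.isPrefixOf_iff_prefix,
          show pvKC = 'c' :: "hange".toList from by decide, List.cons_prefix_cons]
        exact ⟨hp.1, s2⟩
      exact absurd this (by simp [hC])
  rw [pvRep_skip pvKC _ _ _ hC']
  have hH' : pvKH.isPrefixOf (c :: pvRep pvKC ['Â'] (pvRep pvKO ['→'] (pvRep pvKE ['⊙'] t))) = false := by
    cases hb : pvKH.isPrefixOf (c :: pvRep pvKC ['Â'] (pvRep pvKO ['→'] (pvRep pvKE ['⊙'] t))) with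
    | false => rfl
    | true =>
      exfalso
      have hp := List.isPrefixOf_iff_prefix.mp hb
      rw [show pvKH = 'c' :: "oherence".toList from by decide, List.cons_prefix_cons] at hp
      have s1 := pvRep_refl pvKC 'Â' (pvRep pvKO ['→'] (pvRep pvKE ['⊙'] t)) "oherence".toList
        (by decide) hp.2
      have s2 := pvRep_refl pvKO '→' (pvRep pvKE ['⊙'] t) "oherence".toList (by decide) s1
      have s3 := pvRep_refl pvKE '⊙' t "oherence".toList (by decide) s2
      have : pvKH.isPrefixOf (c :: t) = true := by
        rw [List.isPrefixOf_iff_prefix,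
          show pvKH = 'c' :: "oherence".toList from by decide, List.cons_prefix_cons]
        exact ⟨hp.1, s3⟩
      exact absurd this (by simp [hH])
  rw [pvRep_skip pvKH _ _ _ hH']

-- ===== pvScan step lemmas =====

theorem pvScan_E (t : List Char) : pvScan (pvKE ++ t) = '⊙' :: pvScan t := by
  rw [show pvKE ++ t = 'e'::'x'::'i'::'s'::'t'::'e'::'n'::'c'::'e'::t by simp [pvKE]]
  rw [pvScan]
  simp [pvGlyphTable, List.isPrefixOf]

theorem pvScan_O (t : List Char) : pvScan (pvKO ++ t) = '→' :: pvScan t := by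
  rw [show pvKO ++ t = 'o'::'b'::'s'::'e'::'r'::'v'::'e'::'s'::t by simp [pvKO]]
  rw [pvScan]
  simp [pvGlyphTable, List.find?, List.isPrefixOf]

theorem pvScan_C (t : List Char) : pvScan (pvKC ++ t) = 'Â' :: pvScan t := by
  rw [show pvKC ++ t = 'c'::'h'::'a'::'n'::'g'::'e'::t by simp [pvKC]]
  rw [pvScan]
  simp [pvGlyphTable, List.find?, List.isPrefixOf]

theorem pvScan_H (t : List Char) : pvScan (pvKH ++ t) = 'K' :: pvScan t := by
  rw [show pvKH ++ t = 'c'::'o'::'h'::'e'::'r'::'e'::'n'::'c'::'e'::t by simp [pvKH]]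
  rw [pvScan]
  simp [pvGlyphTable, List.isPrefixOf]

theorem pvScan_skip (c : Char) (t : List Char)
    (hE : pvKE.isPrefixOf (c :: t) = false) (hO : pvKO.isPrefixOf (c :: t) = false)
    (hC : pvKC.isPrefixOf (c :: t) = false) (hH : pvKH.isPrefixOf (c :: t) = false) :
    pvScan (c :: t) = c :: pvScan t := by
  have hfind : pvGlyphTable.find? (fun p => p.1.isPrefixOf (c :: t)) = none := by
    simp only [pvGlyphTable, List.find?]
    rw [show ("existence".toList).isPrefixOf (c :: t) = false from hE,
        show ("observes".toList).isPrefixOf (c :: t) = false from hO,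
        show ("change".toList).isPrefixOf (c :: t) = false from hC,
        show ("coherence".toList).isPrefixOf (c :: t) = false from hH]
  rw [pvScan, hfind]

-- ===== main induction =====

theorem pvMain : ∀ (n : Nat) (l : List Char), l.length ≤ n → pvGood l → pvF l = pvScan l := by
  intro n
  induction n with
  | zero =>
    intro l hl _
    have : l = [] := by cases l with | nil => rfl | cons c t => simp at hl
    subst this
    simp [pvF, pvRep, pvScan]
  | succ n ih =>
    intro l hl hg
    cases hE : pvKE.isPrefixOf l with
    | true =>
      obtain ⟨t, rfl⟩ := List.isPrefixOf_iff_prefix.mp hE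
      have htlen : t.length ≤ n := by simp [pvKE] at hl; omega
      have hgt : pvGood t := by
        have := pvGood_drop (pvKE ++ t) pvKE.length hg
        rwa [List.drop_left] at this
      rw [pvF_E, pvScan_E, ih t htlen hgt]
    | false =>
      cases hO : pvKO.isPrefixOf l with
      | true =>
        obtain ⟨t, rfl⟩ := List.isPrefixOf_iff_prefix.mp hO
        have htlen : t.length ≤ n := by simp [pvKO] at hl; omega
        have hgt : pvGood t := by
          have := pvGood_drop (pvKO ++ t) pvKO.length hg
          rwa [List.drop_left] at this
        rw [pvF_O, pvScan_O, ih t htlen hgt]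
      | false =>
        cases hC : pvKC.isPrefixOf l with
        | true =>
          obtain ⟨t, rfl⟩ := List.isPrefixOf_iff_prefix.mp hC
          have htlen : t.length ≤ n := by simp [pvKC] at hl; omega
          have hgt : pvGood t := by
            have := pvGood_drop (pvKC ++ t) pvKC.length hg
            rwa [List.drop_left] at this
          have hx : ("xistence".toList).isPrefixOf t = false := by
            cases hxx : ("xistence".toList).isPrefixOf t with
            | false => rfl
            | true =>
              exfalso
              obtain ⟨r, rfl⟩ := List.isPrefixOf_iff_prefix.mp hxx
              refine hg.1 ⟨[], r, ?_⟩
              rw [show "changexistence".toList = "change".toList ++ "xistence".toList from by decide]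
              simp [pvKC]
          rw [pvF_C t hx, pvScan_C, ih t htlen hgt]
        | false =>
          cases hH : pvKH.isPrefixOf l with
          | true =>
            obtain ⟨t, rfl⟩ := List.isPrefixOf_iff_prefix.mp hH
            have htlen : t.length ≤ n := by simp [pvKH] at hl; omega
            have hgt : pvGood t := by
              have := pvGood_drop (pvKH ++ t) pvKH.length hg
              rwa [List.drop_left] at this
            have hx : ("xistence".toList).isPrefixOf t = false := by
              cases hxx : ("xistence".toList).isPrefixOf t with
              | false => rfl
              | true =>
                exfalso
                obtain ⟨r, rfl⟩ := List.isPrefixOf_iff_prefix.mp hxx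
                refine hg.2 ⟨[], r, ?_⟩
                rw [show "coherencexistence".toList = "coherence".toList ++ "xistence".toList from by decide]
                simp [pvKH]
            rw [pvF_H t hx, pvScan_H, ih t htlen hgt]
          | false =>
            cases l with
            | nil => simp [pvF, pvRep, pvScan]
            | cons c t =>
              have htlen : t.length ≤ n := by simp at hl; omega
              have hgt : pvGood t := by
                have := pvGood_drop (c :: t) 1 hg
                simpa using this
              rw [pvF_skip c t hE hO hC hH, pvScan_skip c t hE hO hC hH, ih t htlen hgt]

-- one str.replace call in terms of pvRep
theorem pvA_repl (s old gs : String) (oldL : List Char) (g : Char)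
    (hL : old.toList = oldL) (hne : oldL ≠ []) (hg : gs.toList = [g]) :
    PySem.Str.replace s old gs = String.ofList (pvRep oldL [g] s.toList) := by
  simp only [PySem.Str.replace, hL, hg]
  rw [pvReplace_eq oldL [g] s.toList hne]

-- A's fold of four replaces, written out, equals pvF on the character list
theorem pvA_eq (english : String) :
    translate_to_lumeren english = String.ofList (pvF english.toList) := by
  unfold translate_to_lumeren
  simp only [List.foldl]
  rw [pvA_repl _ "existence" "⊙" pvKE '⊙' rfl (by decide) rfl,
      pvA_repl _ "observes" "→" pvKO '→' rfl (by decide) rfl,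
      pvA_repl _ "change" "Â" pvKC 'Â' rfl (by decide) rfl,
      pvA_repl _ "coherence" "K" pvKH 'K' rfl (by decide) rfl]
  simp only [String.toList_ofList]
  rfl

-- ===== VERDICT (by name: the statement is the Claim_ definition above) =====
theorem translate_to_lumeren_spec : Claim_equal_translate_to_lumeren := by
  intro english _ hpre
  unfold Spec_translate_to_lumeren translate_to_lumeren_alt
  rw [pvA_eq]
  congr 1
  apply pvMain english.toList.length _ le_rfl
  constructor
  · intro hinf
    have h2 : PySem.Chars.isIn "changexistence".toList english.toList = true :=
      (PySem.Chars.isIn_iff_infix _ _).mpr hinf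
    have h3 := hpre.1
    rw [PySem.Str.isIn_eq] at h3
    rw [h3] at h2
    exact Bool.false_ne_true h2
  · intro hinf
    have h2 : PySem.Chars.isIn "coherencexistence".toList english.toList = true :=
      (PySem.Chars.isIn_iff_infix _ _).mpr hinf
    have h3 := hpre.2
    rw [PySem.Str.isIn_eq] at h3
    rw [h3] at h2
    exact Bool.false_ne_true h2
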